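-- pv_equiv track=rewrite | github.com/yuantongkang/font-subset-tool | .github/scripts/process-font.py | generate_css
-- ===== SOURCE A (Python) =====
-- def generate_unicode_range(codepoints):
--     """Generate Unicode range string"""
--     if not codepoints:
--         return 'U+0000-FFFF'
--
--     ranges = []
--     start = codepoints[0]
--     end = start
--
--     for i in range(1, len(codepoints)):
--         if codepoints[i] == end + 1:
--             end = codepoints[i]
--         else:
--             if start == end:
--                 ranges.append(f"U+{start:04X}")
--             else:
--                 ranges.append(f"U+{start:04X}-{end:04X}")
--             start = codepoints[i]
--             end = start
--
--     if start == end: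
--         ranges.append(f"U+{start:04X}")
--     else:
--         ranges.append(f"U+{start:04X}-{end:04X}")
--
--     return ', '.join(ranges)
--
-- def generate_css(font_files, format, font_weight, font_style, font_family, font_file_name):
--     """Generate CSS code"""
--     css_parts = []
--
--     for index, file_info in enumerate(font_files):
--         font_url = f"./fonts/{font_file_name}-subset-{index + 1}.{format}"
--         unicode_range = generate_unicode_range(file_info['codepoints'])
--
--         css_parts.append(f"""@font-face {{
--     font-family: '{font_family}';
--     src: url('{font_url}') format('{format}');
--     font-weight: {font_weight};
--     font-style: {font_style};
--     unicode-range: {unicode_range};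
--     font-display: swap;
-- }}""")
--
--     return '\n\n'.join(css_parts)
-- ===== SOURCE B (Python) =====
-- def generate_unicode_range(codepoints):
--     """Generate Unicode range string"""
--     if not codepoints:
--         return 'U+0000-FFFF'
--     # build the runs back-to-front: scan from the right, extending the
--     # most recently created run when the current codepoint is exactly one
--     # below its start
--     runs = []
--     for c in reversed(codepoints):
--         if runs and c + 1 == runs[-1][0]:
--             runs[-1] = (c, runs[-1][1])
--         else:
--             runs.append((c, c))
--     return ', '.join(
--         f"U+{lo:04X}" if lo == hi else f"U+{lo:04X}-{hi:04X}"
--         for lo, hi in reversed(runs)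
--     )
--
-- def generate_css(font_files, format, font_weight, font_style, font_family, font_file_name):
--     """Generate CSS code"""
--     return '\n\n'.join(
--         f"""@font-face {{
--     font-family: '{font_family}';
--     src: url('./fonts/{font_file_name}-subset-{index + 1}.{format}') format('{format}');
--     font-weight: {font_weight};
--     font-style: {font_style};
--     unicode-range: {generate_unicode_range(file_info['codepoints'])};
--     font-display: swap;
-- }}"""
--         for index, file_info in enumerate(font_files)
--     )
-- ===== Notes on version B (the rewrite author's own statement) =====
-- stated objective: alternative
-- what changed: generate_unicode_range is rebuilt as a right-to-left scan that assembles (start,end) run pairs back-to-front and formats them in one pass, instead of A's forward accumulator loop with inline emission and a duplicated final flush; generate_css becomes a single join over a generator expression instead of an append loop.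
import Mathlib
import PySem

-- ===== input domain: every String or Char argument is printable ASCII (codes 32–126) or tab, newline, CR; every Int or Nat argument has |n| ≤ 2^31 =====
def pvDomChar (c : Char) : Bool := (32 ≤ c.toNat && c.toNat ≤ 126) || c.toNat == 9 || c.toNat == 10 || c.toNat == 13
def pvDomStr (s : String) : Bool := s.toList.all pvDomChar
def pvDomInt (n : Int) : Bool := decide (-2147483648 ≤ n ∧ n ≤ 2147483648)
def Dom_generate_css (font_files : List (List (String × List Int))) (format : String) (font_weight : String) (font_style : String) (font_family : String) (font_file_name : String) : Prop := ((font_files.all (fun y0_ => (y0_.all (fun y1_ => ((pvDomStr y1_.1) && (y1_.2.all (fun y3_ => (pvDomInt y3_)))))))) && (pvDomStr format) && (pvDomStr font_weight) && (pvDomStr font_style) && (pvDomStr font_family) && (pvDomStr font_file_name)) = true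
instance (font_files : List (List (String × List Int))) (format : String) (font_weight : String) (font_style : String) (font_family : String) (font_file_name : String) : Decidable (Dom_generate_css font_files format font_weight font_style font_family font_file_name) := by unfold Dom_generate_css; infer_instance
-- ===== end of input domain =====

-- B rebuilds the unicode ranges by a right-to-left scan that assembles (start, end) run pairs
-- back-to-front and formats them in one pass, and generate_css becomes a single join over a map
-- instead of an accumulator loop (objective: alternative decomposition, same cost).

-- ===== PORT A =====
-- shared formatting primitive: exact hand port of Python's f"{v:04X}"
-- (uppercase hex of |v|, zero-padded to total width 4 including a leading '-' for negatives)
def pyHexDigit (n : Nat) : Char := if n < 10 then Char.ofNat (48 + n) else Char.ofNat (55 + n)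

def pyHexChars (n : Nat) : List Char :=
  if h : n = 0 then [] else pyHexChars (n / 16) ++ [pyHexDigit (n % 16)]
  decreasing_by exact Nat.div_lt_self (Nat.pos_of_ne_zero h) (by omega)

def hex04 (v : Int) : String :=
  if v < 0 then
    String.ofList ('-' :: (List.replicate (3 - (pyHexChars v.natAbs).length) '0' ++ pyHexChars v.natAbs))
  else
    String.ofList (List.replicate (4 - (pyHexChars v.natAbs).length) '0' ++ pyHexChars v.natAbs)

-- A's loop 'for i in range(1, len(codepoints))' reads codepoints[i]; iterating the tail is the same
def gurLoop (rest : List Int) (ranges : List String) (start end_ : Int) : List String :=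
  match rest with
  | [] =>
      if start = end_ then ranges ++ ["U+" ++ hex04 start]
      else ranges ++ ["U+" ++ hex04 start ++ "-" ++ hex04 end_]
  | c :: cs =>
      if c = end_ + 1 then gurLoop cs ranges start c
      else if start = end_ then gurLoop cs (ranges ++ ["U+" ++ hex04 start]) c c
      else gurLoop cs (ranges ++ ["U+" ++ hex04 start ++ "-" ++ hex04 end_]) c c

def generate_unicode_range (codepoints : List Int) : String :=
  match codepoints with
  | [] => "U+0000-FFFF"
  | c :: cs => ", ".intercalate (gurLoop cs [] c c)

-- file_info['codepoints']: first-match lookup; KeyError (no match) is excluded by Pre_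
def getCodepoints (file_info : List (String × List Int)) : List Int :=
  ((file_info.find? (fun kv => kv.1 == "codepoints")).map (·.2)).getD []

def generate_css (font_files : List (List (String × List Int))) (format : String) (font_weight : String) (font_style : String) (font_family : String) (font_file_name : String) : String :=
  let css_parts := (PySem.List.enumerate font_files 0).foldl (fun acc p =>
    let font_url := "./fonts/" ++ font_file_name ++ "-subset-" ++ PySem.Int.toStr (p.1 + 1) ++ "." ++ format
    let unicode_range := generate_unicode_range (getCodepoints p.2)
    acc ++ ["@font-face {\n    font-family: '" ++ font_family ++ "';\n    src: url('" ++ font_url ++ "') format('" ++ format ++ "');\n    font-weight: " ++ font_weight ++ ";\n    font-style: " ++ font_style ++ ";\n    unicode-range: " ++ unicode_range ++ ";\n    font-display: swap;\n}"]) []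
  "\n\n".intercalate css_parts

-- ===== PORT B =====
-- Source B builds 'runs' by appending/updating the LAST element while scanning reversed(codepoints),
-- and finally iterates reversed(runs); here the list is kept head-first (head = Python's runs[-1]),
-- so the fold's result is already reversed(runs)
def consRunRev (rs : List (Int × Int)) (c : Int) : List (Int × Int) :=
  match rs with
  | [] => [(c, c)]
  | (lo, hi) :: rest => if c + 1 = lo then (c, hi) :: rest else (c, c) :: (lo, hi) :: rest

def fmtRun (p : Int × Int) : String :=
  if p.1 = p.2 then "U+" ++ hex04 p.1 else "U+" ++ hex04 p.1 ++ "-" ++ hex04 p.2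

def generate_unicode_range_alt (codepoints : List Int) : String :=
  if codepoints = [] then "U+0000-FFFF"
  else ", ".intercalate ((codepoints.reverse.foldl consRunRev []).map fmtRun)

def generate_css_alt (font_files : List (List (String × List Int))) (format : String) (font_weight : String) (font_style : String) (font_family : String) (font_file_name : String) : String :=
  "\n\n".intercalate ((PySem.List.enumerate font_files 0).map (fun p =>
    "@font-face {\n    font-family: '" ++ font_family ++ "';\n    src: url('" ++
      ("./fonts/" ++ font_file_name ++ "-subset-" ++ PySem.Int.toStr (p.1 + 1) ++ "." ++ format) ++
      "') format('" ++ format ++ "');\n    font-weight: " ++ font_weight ++ ";\n    font-style: " ++ font_style ++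
      ";\n    unicode-range: " ++ generate_unicode_range_alt (getCodepoints p.2) ++ ";\n    font-display: swap;\n}"))

-- ===== PRECONDITION & SPEC =====
-- Pre_ excludes exactly the inputs where some file_info lacks the key 'codepoints':
-- there Python A raises KeyError (and Python B raises the same KeyError).
def Pre_generate_css (font_files : List (List (String × List Int))) (format : String) (font_weight : String) (font_style : String) (font_family : String) (font_file_name : String) : Prop :=
  (font_files.all (fun fi => fi.any (fun kv => kv.1 == "codepoints"))) = true
instance (font_files : List (List (String × List Int))) (format : String) (font_weight : String) (font_style : String) (font_family : String) (font_file_name : String) : Decidable (Pre_generate_css font_files format font_weight font_style font_family font_file_name) := by unfold Pre_generate_css; infer_instance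

def pvWitness_generate_css : (List (List (String × List Int))) × String × String × String × String × String :=
  ([[("codepoints", [65, 66, 70])]], "woff2", "400", "normal", "MyFont", "font")

def Spec_generate_css (font_files : List (List (String × List Int))) (format : String) (font_weight : String) (font_style : String) (font_family : String) (font_file_name : String) (out : String) : Prop := out = generate_css_alt font_files format font_weight font_style font_family font_file_name
instance (font_files : List (List (String × List Int))) (format : String) (font_weight : String) (font_style : String) (font_family : String) (font_file_name : String) (out : String) : Decidable (Spec_generate_css font_files format font_weight font_style font_family font_file_name out) := by unfold Spec_generate_css; infer_instance

-- ===== CLAIM (what is proved, stated in full; the proofs are below) =====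
def Claim_equal_generate_css : Prop := ∀ (font_files : List (List (String × List Int))) (format : String) (font_weight : String) (font_style : String) (font_family : String) (font_file_name : String), Dom_generate_css font_files format font_weight font_style font_family font_file_name → Pre_generate_css font_files format font_weight font_style font_family font_file_name → Spec_generate_css font_files format font_weight font_style font_family font_file_name (generate_css font_files format font_weight font_style font_family font_file_name)

-- ===== LEMMAS AND PROOFS =====

-- proof-only characterisation of A's loop: the run pairs it will emit from current run (s,e)
def runsFrom (s e : Int) : List Int → List (Int × Int)
  | [] => [(s, e)]
  | c :: cs => if c = e + 1 then runsFrom s c cs else (s, e) :: runsFrom c c cs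

lemma gurLoop_eq (rest : List Int) (ranges : List String) (s e : Int) :
    gurLoop rest ranges s e = ranges ++ (runsFrom s e rest).map fmtRun := by
  induction rest generalizing ranges s e with
  | nil => simp [gurLoop, runsFrom, fmtRun]; split_ifs <;> simp
  | cons c cs ih =>
      simp only [gurLoop, runsFrom]
      split_ifs with h1 h2
      · exact ih ranges s c
      · rw [ih]; simp [fmtRun, h2]
      · rw [ih]; simp [fmtRun, h2]

-- B's fold over the reversed list is a foldr
lemma foldlRev_eq_foldr (cs : List Int) :
    cs.reverse.foldl consRunRev [] = cs.foldr (fun c rs => consRunRev rs c) [] := by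
  rw [List.foldl_reverse]

-- the head run produced from c :: cs starts at c
lemma foldr_head (c : Int) (cs : List Int) :
    ∃ hi rs, (c :: cs).foldr (fun c rs => consRunRev rs c) [] = (c, hi) :: rs := by
  induction cs generalizing c with
  | nil => exact ⟨c, [], rfl⟩
  | cons d ds ih =>
      obtain ⟨hi, rs, h⟩ := ih d
      simp only [List.foldr_cons] at h ⊢
      rw [h]
      by_cases hc : c + 1 = d
      · exact ⟨hi, rs, by simp [consRunRev, hc]⟩
      · exact ⟨c, (d, hi) :: rs, by simp [consRunRev, hc]⟩

def extendHead (s : Int) : List (Int × Int) → List (Int × Int)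
  | [] => []
  | (_, hi) :: rs => (s, hi) :: rs

lemma runsFrom_eq (cs : List Int) (s e : Int) :
    runsFrom s e cs = extendHead s ((e :: cs).foldr (fun c rs => consRunRev rs c) []) := by
  induction cs generalizing s e with
  | nil => rfl
  | cons c cs ih =>
      obtain ⟨hi, rs, h⟩ := foldr_head c cs
      have hfold : (e :: c :: cs).foldr (fun c rs => consRunRev rs c) []
          = consRunRev ((c, hi) :: rs) e := by
        simp only [List.foldr_cons] at h ⊢; rw [h]
      rw [hfold]
      by_cases h1 : c = e + 1
      · -- merged: both sides extend the head run
        have hm : consRunRev ((c, hi) :: rs) e = (e, hi) :: rs := by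
          simp [consRunRev, show e + 1 = c by omega]
        simp only [runsFrom, if_pos h1]
        rw [ih s c, h, hm]; rfl
      · -- new run
        have hm : consRunRev ((c, hi) :: rs) e = (e, e) :: (c, hi) :: rs := by
          simp [consRunRev, show ¬ e + 1 = c by omega]
        simp only [runsFrom, if_neg h1]
        rw [ih c c, h, hm]; rfl

lemma gur_eq (cps : List Int) : generate_unicode_range cps = generate_unicode_range_alt cps := by
  cases cps with
  | nil => rfl
  | cons c cs =>
      show ", ".intercalate (gurLoop cs [] c c) = generate_unicode_range_alt (c :: cs)
      rw [generate_unicode_range_alt, if_neg (by simp)]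
      rw [gurLoop_eq, foldlRev_eq_foldr, runsFrom_eq]
      obtain ⟨hi, rs, h⟩ := foldr_head c cs
      rw [h]
      rfl

-- ===== VERDICT (by name: the statement is the Claim_ definition above) =====
theorem generate_css_spec : Claim_equal_generate_css := by
  intro font_files format font_weight font_style font_family font_file_name _ _
  show generate_css _ _ _ _ _ _ = generate_css_alt _ _ _ _ _ _
  unfold generate_css generate_css_alt
  rw [PySem.List.foldl_append_singleton_eq_map]
  simp only [gur_eq, List.nil_append]
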